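-- pv_equiv track=rewrite | github.com/Octoberr/sspywork | savecode/threeyears/idownclient/spider/spidersocial/spidermessenger/messengerbase.py | _parse_js_one_v2
-- ===== SOURCE A (Python) =====
-- def _parse_js_one_v2(js_one: str):
--     """处理wss请求返回的js， 字符串参数转换成列表, 转义字符要多一层"""
--     param_list = [i.strip() for i in js_one.split(',')]
--     my_list = []
--     temp = ''
--     for param in param_list:
--         if temp == '':
--             if param.startswith('\\"'):
--                 if not param.endswith('\\"') or param.endswith('\\\\\\"'):
--                     temp = param
--                     continue
--             my_list.append(param)
--         else:
--             temp += ","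
--             temp += param
--             if param.endswith('\\"') and not param.endswith('\\\\\\"'):
--                 my_list.append(temp)
--                 temp = ''
--                 continue
--     return my_list
-- ===== SOURCE B (Python) =====
-- def _parse_js_one_v2(js_one: str):
--     """Index-based while loop: reassemble comma-split pieces whose escaped-quote group spans several pieces."""
--     pieces = [p.strip() for p in js_one.split(',')]
--     out = []
--     i = 0
--     n = len(pieces)
--     while i < n:
--         p = pieces[i]
--         i += 1
--         if p.startswith('\\"') and (not p.endswith('\\"') or p.endswith('\\\\\\"')):
--             buf = p
--             while i < n:
--                 q = pieces[i]
--                 i += 1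
--                 buf += ',' + q
--                 if q.endswith('\\"') and not q.endswith('\\\\\\"'):
--                     out.append(buf)
--                     break
--             # a group that never closes is dropped
--         else:
--             out.append(p)
--     return out
-- ===== Notes on version B (the rewrite author's own statement) =====
-- stated objective: alternative
-- what changed: Replaces A's persistent temp-flag state machine with an index-based while loop that, on seeing an opening escaped-quote piece, runs an inner loop consuming the whole group before resuming; the buffer state no longer crosses loop iterations.
import Mathlib
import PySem

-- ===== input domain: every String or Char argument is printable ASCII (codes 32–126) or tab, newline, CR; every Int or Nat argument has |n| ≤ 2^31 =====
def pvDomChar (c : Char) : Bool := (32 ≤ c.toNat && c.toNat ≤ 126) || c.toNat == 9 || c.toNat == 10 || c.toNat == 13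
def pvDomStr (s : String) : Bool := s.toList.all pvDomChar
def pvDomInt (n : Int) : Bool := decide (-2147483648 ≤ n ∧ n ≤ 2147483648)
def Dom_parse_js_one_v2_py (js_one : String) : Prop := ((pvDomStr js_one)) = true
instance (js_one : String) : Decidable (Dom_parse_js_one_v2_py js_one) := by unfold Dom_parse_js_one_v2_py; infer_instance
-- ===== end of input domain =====

-- B replaces A's persistent temp-flag state machine by an index-style outer loop with an inner loop that consumes a whole escaped-quote group (alternative decomposition, same cost).
-- ===== PORT A =====
-- A: single pass with a persistent `temp` accumulator flag (literal transliteration).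
def pvStepA (st : List String × String) (param : String) : List String × String :=
  if st.2 == "" then
    if PySem.Str.startswith param "\\\"" then
      if !(PySem.Str.endswith param "\\\"") || PySem.Str.endswith param "\\\\\\\"" then
        (st.1, param)
      else (st.1 ++ [param], "")
    else (st.1 ++ [param], "")
  else
    let t := (st.2 ++ ",") ++ param
    if PySem.Str.endswith param "\\\"" && !(PySem.Str.endswith param "\\\\\\\"") then
      (st.1 ++ [t], "")
    else (st.1, t)

def parse_js_one_v2_py (js_one : String) : List String :=
  let param_list := ((PySem.Str.split? js_one ",").getD []).map PySem.Str.strip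
  (param_list.foldl pvStepA ([], "")).1

-- ===== PORT B =====
-- B: index-based outer loop; an inner loop consumes a whole escaped-quote group at once.
mutual
def pvBOuter : List String → List String
  | [] => []
  | p :: rest =>
    if PySem.Str.startswith p "\\\"" &&
       (!(PySem.Str.endswith p "\\\"") || PySem.Str.endswith p "\\\\\\\"") then
      pvBInner p rest
    else p :: pvBOuter rest
def pvBInner (buf : String) : List String → List String
  | [] => []          -- a group that never closes is dropped
  | q :: rest =>
    let buf' := (buf ++ ",") ++ q
    if PySem.Str.endswith q "\\\"" && !(PySem.Str.endswith q "\\\\\\\"") then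
      buf' :: pvBOuter rest
    else pvBInner buf' rest
end

def parse_js_one_v2_py_alt (js_one : String) : List String :=
  pvBOuter (((PySem.Str.split? js_one ",").getD []).map PySem.Str.strip)

-- ===== PRECONDITION & SPEC =====
def Spec_parse_js_one_v2_py (js_one : String) (out : List String) : Prop := out = parse_js_one_v2_py_alt js_one
instance (js_one : String) (out : List String) : Decidable (Spec_parse_js_one_v2_py js_one out) := by unfold Spec_parse_js_one_v2_py; infer_instance

-- ===== CLAIM (what is proved, stated in full; the proofs are below) =====
def Claim_equal_parse_js_one_v2_py : Prop := ∀ (js_one : String), Dom_parse_js_one_v2_py js_one → Spec_parse_js_one_v2_py js_one (parse_js_one_v2_py js_one)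

-- ===== LEMMAS AND PROOFS =====

theorem pv_ne_empty_of_startswith (p : String)
    (h : PySem.Str.startswith p "\\\"" = true) : p ≠ "" := by
  intro he; subst he; simp [PySem.Str.startswith, PySem.Chars.startswith] at h

theorem pv_append_ne_empty (t q : String) : (t ++ ",") ++ q ≠ "" := by
  intro h
  have := congrArg String.length h
  simp [String.length_append] at this

theorem pv_key (l : List String) : ∀ (acc : List String) (t : String),
    (l.foldl pvStepA (acc, "")).1 = acc ++ pvBOuter l ∧
    (t ≠ "" → (l.foldl pvStepA (acc, t)).1 = acc ++ pvBInner t l) := by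
  induction l with
  | nil => intro acc t; simp [pvBOuter, pvBInner]
  | cons p rest ih =>
    intro acc t
    constructor
    · show ((p :: rest).foldl pvStepA (acc, "")).1 = acc ++ pvBOuter (p :: rest)
      simp only [List.foldl_cons]
      rw [pvBOuter]
      by_cases hs : PySem.Str.startswith p "\\\"" = true
      · by_cases he : (!(PySem.Str.endswith p "\\\"") || PySem.Str.endswith p "\\\\\\\"") = true
        · have hstep : pvStepA (acc, "") p = (acc, p) := by
            simp only [pvStepA]
            rw [if_pos (by rfl), if_pos hs, if_pos he]
          rw [hstep, if_pos (show _ = true by rw [hs, he]; rfl)]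
          exact (ih acc p).2 (pv_ne_empty_of_startswith p hs)
        · have hstep : pvStepA (acc, "") p = (acc ++ [p], "") := by
            simp only [pvStepA]
            rw [if_pos (by rfl), if_pos hs, if_neg he]
          rw [hstep, if_neg (fun h => he (by rwa [hs, Bool.true_and] at h)),
            (ih (acc ++ [p]) "").1]
          simp
      · have hstep : pvStepA (acc, "") p = (acc ++ [p], "") := by
          simp only [pvStepA]
          rw [if_pos (by rfl), if_neg hs]
        rw [hstep, if_neg (fun h => hs ((Bool.and_eq_true _ _).mp h).1),
          (ih (acc ++ [p]) "").1]
        simp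
    · intro ht
      show ((p :: rest).foldl pvStepA (acc, t)).1 = acc ++ pvBInner t (p :: rest)
      simp only [List.foldl_cons]
      rw [pvBInner]
      have htne : ¬ (t == "") = true := by simpa using ht
      by_cases hc : (PySem.Str.endswith p "\\\"" && !(PySem.Str.endswith p "\\\\\\\"")) = true
      · have hstep : pvStepA (acc, t) p = (acc ++ [(t ++ ",") ++ p], "") := by
          simp only [pvStepA]
          rw [if_neg htne, if_pos hc]
        rw [hstep, if_pos hc, (ih (acc ++ [(t ++ ",") ++ p]) "").1]
        simp
      · have hstep : pvStepA (acc, t) p = (acc, (t ++ ",") ++ p) := by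
          simp only [pvStepA]
          rw [if_neg htne, if_neg hc]
        rw [hstep, if_neg hc]
        exact (ih acc ((t ++ ",") ++ p)).2 (pv_append_ne_empty t p)

-- ===== VERDICT (by name: the statement is the Claim_ definition above) =====
theorem parse_js_one_v2_py_spec : Claim_equal_parse_js_one_v2_py := by
  intro js_one _
  unfold Spec_parse_js_one_v2_py parse_js_one_v2_py parse_js_one_v2_py_alt
  exact ((pv_key _) [] "").1
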